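-- pv_equiv track=rewrite | github.com/ta-ho/baekjoon | 백준/Bronze/8958. OX퀴즈/OX퀴즈.py | total_score
-- ===== SOURCE A (Python) =====
-- def total_score(a):
--     count = 0
--     score = 0
--     for char in a:
--         if char == 'O':
--             count += 1
--             score += count # 이게 키 포인트!!
--         else:
--             count = 0
--     return score
-- ===== SOURCE B (Python) =====
-- def total_score(a):
--     total = 0
--     i = 0
--     n = len(a)
--     while i < n:
--         if a[i] == 'O':
--             j = i
--             while j < n and a[j] == 'O':
--                 j += 1
--             run = j - i
--             total += run * (run + 1) // 2
--             i = j
--         else: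
--             i += 1
--     return total
-- ===== Notes on version B (the rewrite author's own statement) =====
-- stated objective: alternative
-- what changed: B scans the string once to find each maximal run of correct answers and adds the triangular-number closed form run*(run+1)//2 per run, instead of A's per-character incremental counter-and-score update.
import Mathlib
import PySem

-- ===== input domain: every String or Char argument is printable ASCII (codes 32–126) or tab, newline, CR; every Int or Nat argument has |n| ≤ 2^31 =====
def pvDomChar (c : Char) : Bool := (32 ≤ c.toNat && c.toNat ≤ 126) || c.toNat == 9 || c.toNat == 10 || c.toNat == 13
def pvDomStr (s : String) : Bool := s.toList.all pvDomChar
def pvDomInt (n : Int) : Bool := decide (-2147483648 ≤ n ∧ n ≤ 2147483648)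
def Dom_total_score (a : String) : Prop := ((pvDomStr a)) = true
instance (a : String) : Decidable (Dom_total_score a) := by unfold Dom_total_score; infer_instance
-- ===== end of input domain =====

-- B changes the decomposition (per-run closed form instead of per-character counter); objective: alternative.

-- ===== PORT A =====
-- the for-loop over characters with state (count, score), as structural recursion
def pvAGo : List Char → Int → Int → Int
  | [], _, score => score
  | c :: cs, count, score =>
    if c = 'O' then pvAGo cs (count + 1) (score + (count + 1))
    else pvAGo cs 0 score

def total_score (a : String) : Int := pvAGo a.toList 0 0

-- ===== PORT B =====
-- Source B's outer scan; the inner while-loop that finds the end of the current run is the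
-- takeWhile/dropWhile pair (run = j - i), exact on every input
def pvBGo : List Char → Int
  | [] => 0
  | c :: cs =>
    if c = 'O' then
      let run : Int := ((cs.takeWhile (fun x => x = 'O')).length : Int) + 1
      PySem.Int.floordiv (run * (run + 1)) 2 + pvBGo (cs.dropWhile (fun x => x = 'O'))
    else pvBGo cs
termination_by l => l.length
decreasing_by
  · simpa using Nat.lt_succ_of_le (List.length_dropWhile_le _ _)
  · simp

def total_score_alt (a : String) : Int := pvBGo a.toList

-- ===== PRECONDITION & SPEC =====
def Spec_total_score (a : String) (out : Int) : Prop := out = total_score_alt a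
instance (a : String) (out : Int) : Decidable (Spec_total_score a out) := by unfold Spec_total_score; infer_instance

-- ===== CLAIM (what is proved, stated in full; the proofs are below) =====
def Claim_equal_total_score : Prop := ∀ (a : String), Dom_total_score a → Spec_total_score a (total_score a)

-- ===== LEMMAS AND PROOFS =====

-- the score accumulator is additive
theorem pvAGo_add (l : List Char) : ∀ (c s : Int), pvAGo l c s = s + pvAGo l c 0 := by
  induction l with
  | nil => intro c s; simp [pvAGo]
  | cons x xs ih =>
    intro c s
    by_cases hx : x = 'O' <;> simp [pvAGo, hx]
    · rw [ih (c + 1) (s + (c + 1)), ih (c + 1) (c + 1)]; ring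
    · exact ih 0 s

-- running A over the leading 'O'-run starting with counter c adds Σ_{i=1}^{k} (c+i)
def pvRunSum (c : Int) : Nat → Int
  | 0 => 0
  | k + 1 => (c + 1) + pvRunSum (c + 1) k

theorem pvAGo_run (l : List Char) : ∀ (c : Int),
    pvAGo l c 0 = pvRunSum c (l.takeWhile (fun x => x = 'O')).length
      + pvAGo (l.dropWhile (fun x => x = 'O')) 0 0 := by
  induction l with
  | nil => intro c; simp [pvAGo, pvRunSum]
  | cons x xs ih =>
    intro c
    by_cases hx : x = 'O'
    · simp only [pvAGo, hx, List.takeWhile_cons, List.dropWhile_cons, decide_true, if_true,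
        List.length_cons]
      rw [pvAGo_add, ih (c + 1)]
      simp [pvRunSum]
      ring
    · simp [pvAGo, hx, pvRunSum]

theorem pvRunSum_closed : ∀ (k : Nat) (c : Int),
    2 * pvRunSum c k = (k : Int) * (2 * c + (k : Int) + 1) := by
  intro k
  induction k with
  | zero => intro c; simp [pvRunSum]
  | succ n ih =>
    intro c
    simp only [pvRunSum]
    rw [mul_add, ih (c + 1)]
    push_cast
    ring

theorem pvRunSum_eq_floordiv (k : Nat) :
    pvRunSum 0 k = PySem.Int.floordiv ((k : Int) * ((k : Int) + 1)) 2 := by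
  rw [PySem.Int.floordiv_eq_ediv_of_pos (by omega)]
  have h : (k : Int) * ((k : Int) + 1) = 2 * pvRunSum 0 k := by
    rw [pvRunSum_closed k 0]; ring
  rw [h, Int.mul_ediv_cancel_left _ (by norm_num)]

theorem pvMain : ∀ (n : Nat) (l : List Char), l.length ≤ n → pvAGo l 0 0 = pvBGo l := by
  intro n
  induction n with
  | zero =>
    intro l hl
    have : l = [] := List.length_eq_zero_iff.mp (Nat.le_zero.mp hl)
    subst this; simp [pvAGo, pvBGo]
  | succ m ih =>
    intro l hl
    match l with
    | [] => simp [pvAGo, pvBGo]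
    | x :: xs =>
      by_cases hx : x = 'O'
      · rw [pvAGo_run (x :: xs) 0, pvBGo]
        simp only [hx, List.takeWhile_cons, List.dropWhile_cons, decide_true, if_true,
          List.length_cons]
        have hk := pvRunSum_eq_floordiv ((xs.takeWhile (fun x => x = 'O')).length + 1)
        rw [ih _ (le_trans (List.length_dropWhile_le _ _) (by simpa using hl))]
        push_cast at hk ⊢
        rw [hk]
      · simp only [pvAGo, pvBGo, if_neg hx]
        exact ih xs (by simpa using Nat.lt_succ_iff.mp (Nat.lt_of_lt_of_le (Nat.lt_succ_of_le (Nat.le_refl _)) hl))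

-- ===== VERDICT (by name: the statement is the Claim_ definition above) =====
theorem total_score_spec : Claim_equal_total_score := by
  intro a _
  unfold Spec_total_score total_score total_score_alt
  exact pvMain a.toList.length a.toList (le_refl _)
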